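-- pv_equiv track=rewrite | github.com/diable201/YandexAlgorithms | lec_02/6.py | short_words
-- ===== SOURCE A (Python) =====
-- def short_words(words):
--     minlen = len(words[0])
--     for word in words:
--         if len(word) < minlen:
--             minlen = len(word)
--     ans = []
--     for word in words:
--         if len(word) == minlen:
--             ans.append(word)
--     return ''.join(ans)
-- ===== SOURCE B (Python) =====
-- def short_words(words):
--     minlen = len(words[0])
--     ans = []
--     for word in words:
--         if len(word) < minlen:
--             minlen = len(word)
--             ans = [word]
--         elif len(word) == minlen:
--             ans.append(word)
--     return ''.join(ans)
-- ===== Notes on version B (the rewrite author's own statement) =====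
-- stated objective: alternative
-- what changed: Fused A's two sequential scans (first find the minimum length, then collect matching words) into a single pass that maintains the running minimum together with the list of current-minimum words, resetting it when a shorter word appears.
import Mathlib
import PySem

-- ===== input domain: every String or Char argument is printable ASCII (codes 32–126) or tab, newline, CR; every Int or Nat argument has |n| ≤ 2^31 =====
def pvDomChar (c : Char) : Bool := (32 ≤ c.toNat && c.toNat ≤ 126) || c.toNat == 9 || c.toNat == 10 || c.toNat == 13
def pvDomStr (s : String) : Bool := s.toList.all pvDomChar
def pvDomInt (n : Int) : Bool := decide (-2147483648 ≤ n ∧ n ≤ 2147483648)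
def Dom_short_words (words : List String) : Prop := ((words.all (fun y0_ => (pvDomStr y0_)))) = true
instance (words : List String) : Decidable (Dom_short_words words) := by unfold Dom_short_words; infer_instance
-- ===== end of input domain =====

-- B fuses A's two scans (min-length pass, then collect pass) into one pass keeping the running minimum and its words.

-- ===== PORT A =====
-- first loop of A: running minimum of word lengths
def swMinFold (m : Int) (ws : List String) : Int :=
  ws.foldl (fun m w => if PySem.Str.len w < m then PySem.Str.len w else m) m

-- second loop of A: collect words whose length equals minlen
def swCollect (minlen : Int) (ws : List String) : List String :=
  ws.foldl (fun a w => if PySem.Str.len w = minlen then a ++ [w] else a) []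

def short_words (words : List String) : String :=
  match PySem.List.pyGet? words 0 with
  | none => ""   -- Python raises IndexError here; excluded by Pre_
  | some w0 =>
    let minlen := swMinFold (PySem.Str.len w0) words
    PySem.Str.join "" (swCollect minlen words)

-- ===== PORT B =====
-- single-pass step: shorter word resets the collection, equal length appends
def swStep (st : Int × List String) (w : String) : Int × List String :=
  if PySem.Str.len w < st.1 then (PySem.Str.len w, [w])
  else if PySem.Str.len w = st.1 then (st.1, st.2 ++ [w])
  else st

def short_words_alt (words : List String) : String :=
  match words with
  | [] => ""   -- Python raises IndexError here; excluded by Pre_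
  | w0 :: _ =>
    let st := words.foldl swStep (PySem.Str.len w0, [])
    PySem.Str.join "" st.2

-- ===== PRECONDITION & SPEC =====
-- Pre_ excludes only the empty list, on which both Pythons raise IndexError (words[0]).
def Pre_short_words (words : List String) : Prop := words ≠ []
instance (words : List String) : Decidable (Pre_short_words words) := by unfold Pre_short_words; infer_instance
def pvWitness_short_words : List String := (["ab", "c", "de"])

def Spec_short_words (words : List String) (out : String) : Prop := out = short_words_alt words
instance (words : List String) (out : String) : Decidable (Spec_short_words words out) := by unfold Spec_short_words; infer_instance

-- ===== CLAIM (what is proved, stated in full; the proofs are below) =====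
def Claim_equal_short_words : Prop := ∀ (words : List String), Dom_short_words words → Pre_short_words words → Spec_short_words words (short_words words)

-- ===== LEMMAS AND PROOFS =====

theorem swMinFold_le (ws : List String) (m : Int) : swMinFold m ws ≤ m := by
  induction ws generalizing m with
  | nil => simp [swMinFold]
  | cons w ws ih =>
    show swMinFold (if PySem.Str.len w < m then PySem.Str.len w else m) ws ≤ m
    by_cases h : PySem.Str.len w < m
    · rw [if_pos h]
      exact le_trans (ih (PySem.Str.len w)) (le_of_lt h)
    · rw [if_neg h]; exact ih m

theorem swCollect_eq_filter (ws : List String) (c : Int) (acc : List String) :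
    ws.foldl (fun a w => if PySem.Str.len w = c then a ++ [w] else a) acc
      = acc ++ ws.filter (fun w => decide (PySem.Str.len w = c)) := by
  induction ws generalizing acc with
  | nil => simp
  | cons w ws ih =>
    rw [List.foldl_cons, List.filter_cons]
    simp only [decide_eq_true_eq]
    by_cases h : PySem.Str.len w = c
    · rw [if_pos h, if_pos h, ih]; simp
    · rw [if_neg h, if_neg h, ih]

theorem swStep_fused (ws : List String) (m : Int) (acc : List String) :
    ws.foldl swStep (m, acc)
      = (swMinFold m ws,
         (if swMinFold m ws = m then acc else [])
           ++ ws.filter (fun w => decide (PySem.Str.len w = swMinFold m ws))) := by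
  induction ws generalizing m acc with
  | nil => simp [swMinFold]
  | cons w ws ih =>
    have hmin : swMinFold m (w :: ws)
        = swMinFold (if PySem.Str.len w < m then PySem.Str.len w else m) ws := rfl
    rw [List.foldl_cons]
    by_cases hlt : PySem.Str.len w < m
    · have hM : swMinFold m (w :: ws) = swMinFold (PySem.Str.len w) ws := by
        rw [hmin, if_pos hlt]
      have hle : swMinFold (PySem.Str.len w) ws ≤ PySem.Str.len w :=
        swMinFold_le ws (PySem.Str.len w)
      have hne : swMinFold (PySem.Str.len w) ws ≠ m := by omega
      rw [show swStep (m, acc) w = (PySem.Str.len w, [w]) from by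
        simp only [swStep]; rw [if_pos hlt]]
      rw [ih, hM, if_neg hne, List.filter_cons]
      simp only [decide_eq_true_eq]
      by_cases he : PySem.Str.len w = swMinFold (PySem.Str.len w) ws
      · rw [if_pos he.symm, if_pos he]; simp
      · rw [if_neg (fun h => he h.symm), if_neg he]
    · have hM : swMinFold m (w :: ws) = swMinFold m ws := by
        rw [hmin, if_neg hlt]
      have hle : swMinFold m ws ≤ m := swMinFold_le ws m
      by_cases heq : PySem.Str.len w = m
      · rw [show swStep (m, acc) w = (m, acc ++ [w]) from by
          simp only [swStep]; rw [if_neg hlt, if_pos heq]]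
        rw [ih, hM, List.filter_cons]
        simp only [decide_eq_true_eq]
        by_cases hMm : swMinFold m ws = m
        · have h2 : PySem.Str.len w = swMinFold m ws := by omega
          rw [if_pos hMm, if_pos hMm, if_pos h2]; simp
        · have h2 : ¬ PySem.Str.len w = swMinFold m ws := by omega
          rw [if_neg hMm, if_neg hMm, if_neg h2]
      · have hneq : ¬ PySem.Str.len w = swMinFold m ws := by omega
        rw [show swStep (m, acc) w = (m, acc) from by
          simp only [swStep]; rw [if_neg hlt, if_neg heq]]
        rw [ih, hM, List.filter_cons]
        simp only [decide_eq_true_eq]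
        rw [if_neg hneq]

-- ===== VERDICT (by name: the statement is the Claim_ definition above) =====
theorem short_words_spec : Claim_equal_short_words := by
  intro words _ hpre
  unfold Spec_short_words
  match words with
  | [] => exact absurd rfl hpre
  | w0 :: rest =>
    have hget : PySem.List.pyGet? (w0 :: rest) (0 : Int) = some w0 := by
      simp [PySem.List.pyGet?, PySem.List.pyIdx?]
    show short_words (w0 :: rest) = short_words_alt (w0 :: rest)
    unfold short_words short_words_alt
    rw [hget]
    show PySem.Str.join "" (swCollect (swMinFold (PySem.Str.len w0) (w0 :: rest)) (w0 :: rest))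
       = PySem.Str.join "" ((List.foldl swStep (PySem.Str.len w0, []) (w0 :: rest)).2)
    rw [swStep_fused, ite_self]
    unfold swCollect
    rw [swCollect_eq_filter]
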